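-- pv_equiv track=rewrite | github.com/carl503/Serverless-Labs | lab05/recommender-backend/recommender.py | calculate_movie_rating_matrix
-- ===== SOURCE A (Python) =====
-- def calculate_movie_rating_matrix(movies, user_rating_matrix):
--     movie_rating_matrix = {}
--     for movie in movies:
--         movie_rating_matrix[movie] = []
--         for user in user_rating_matrix:
--             if movie in list(user_rating_matrix[user].keys()):
--                 movie_rating_matrix[movie].append(user)
--
--     return movie_rating_matrix
-- ===== SOURCE B (Python) =====
-- def calculate_movie_rating_matrix(movies, user_rating_matrix):
--     movie_rating_matrix = {movie: [] for movie in movies}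
--     for user, ratings in user_rating_matrix.items():
--         for movie in ratings:
--             if movie in movie_rating_matrix:
--                 movie_rating_matrix[movie].append(user)
--     return movie_rating_matrix
-- ===== Notes on version B (the rewrite author's own statement) =====
-- stated objective: faster
-- what changed: Instead of scanning every user (and materialising their key list) for every movie, B initialises the movie dict once and makes a single pass over each user's ratings, inverting the mapping with O(1) dict membership.
import Mathlib
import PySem

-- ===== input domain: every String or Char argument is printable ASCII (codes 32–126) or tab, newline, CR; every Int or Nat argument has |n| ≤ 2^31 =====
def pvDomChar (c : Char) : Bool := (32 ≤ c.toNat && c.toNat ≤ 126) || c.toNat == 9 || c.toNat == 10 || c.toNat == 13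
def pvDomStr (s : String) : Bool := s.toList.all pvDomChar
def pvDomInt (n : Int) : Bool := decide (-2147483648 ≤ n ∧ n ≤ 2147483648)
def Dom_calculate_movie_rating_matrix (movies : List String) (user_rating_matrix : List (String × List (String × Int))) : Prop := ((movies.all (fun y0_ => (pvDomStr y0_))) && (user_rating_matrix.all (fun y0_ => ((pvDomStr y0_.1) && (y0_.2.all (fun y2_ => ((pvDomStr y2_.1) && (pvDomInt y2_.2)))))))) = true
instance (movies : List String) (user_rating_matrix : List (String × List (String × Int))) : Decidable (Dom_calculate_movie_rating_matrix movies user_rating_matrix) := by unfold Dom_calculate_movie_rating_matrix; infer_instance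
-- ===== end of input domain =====

-- B inverts the mapping: initialise the movie dict once, then a single pass over each user's
-- ratings with O(1) dict membership, instead of scanning every user's key list for every movie.


-- ===== PORT A =====
-- literal port: for each movie, insert [], then scan all user keys, looking each user up
-- in the dict and testing membership of the movie in that user's rating keys.
def calculate_movie_rating_matrix (movies : List String) (user_rating_matrix : List (String × List (String × Int))) : List (String × List String) :=
  (movies.foldl
    (fun (mrm : PySem.Dict String (List String)) movie =>
      (PySem.Dict.mk user_rating_matrix).keys.foldl
        (fun mrm user =>
          if ((((PySem.Dict.mk user_rating_matrix).get? user).getD []).map Prod.fst).contains movie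
          then mrm.modify movie [] (fun l => l ++ [user]) else mrm)
        (mrm.insert movie []))
    PySem.Dict.empty).items

-- ===== PORT B =====
-- literal port of Source B: build {movie: []} once, then one pass over each user's rated movies,
-- appending the user wherever the movie key is present in the result dict.
def calculate_movie_rating_matrix_alt (movies : List String) (user_rating_matrix : List (String × List (String × Int))) : List (String × List String) :=
  let d0 : PySem.Dict String (List String) :=
    movies.foldl (fun d m => d.insert m []) PySem.Dict.empty
  (user_rating_matrix.foldl
    (fun d (p : String × List (String × Int)) =>
      p.2.foldl
        (fun d (q : String × Int) =>
          if d.contains q.1 then d.modify q.1 [] (fun l => l ++ [p.1]) else d)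
        d)
    d0).items

-- ===== PRECONDITION & SPEC =====
-- Pre_ excludes association lists whose user keys, or whose per-user rating keys, contain
-- duplicates: such lists do not represent Python dicts (both arguments are dicts in Python).
def Pre_calculate_movie_rating_matrix (movies : List String) (user_rating_matrix : List (String × List (String × Int))) : Prop :=
  (user_rating_matrix.map Prod.fst).Nodup ∧
  ∀ p ∈ user_rating_matrix, (p.2.map Prod.fst).Nodup
instance (movies : List String) (user_rating_matrix : List (String × List (String × Int))) : Decidable (Pre_calculate_movie_rating_matrix movies user_rating_matrix) := by unfold Pre_calculate_movie_rating_matrix; infer_instance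

def pvWitness_calculate_movie_rating_matrix : List String × (List (String × List (String × Int))) :=
  (["m1", "m2", "m3"], [("u1", [("m1", 5), ("m2", 3)]), ("u2", [("m2", 1), ("m9", 4)])])

def Spec_calculate_movie_rating_matrix (movies : List String) (user_rating_matrix : List (String × List (String × Int))) (out : List (String × List String)) : Prop := out = calculate_movie_rating_matrix_alt movies user_rating_matrix
instance (movies : List String) (user_rating_matrix : List (String × List (String × Int))) (out : List (String × List String)) : Decidable (Spec_calculate_movie_rating_matrix movies user_rating_matrix out) := by unfold Spec_calculate_movie_rating_matrix; infer_instance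

-- ===== CLAIM (what is proved, stated in full; the proofs are below) =====
def Claim_equal_calculate_movie_rating_matrix : Prop := ∀ (movies : List String) (user_rating_matrix : List (String × List (String × Int))), Dom_calculate_movie_rating_matrix movies user_rating_matrix → Pre_calculate_movie_rating_matrix movies user_rating_matrix → Spec_calculate_movie_rating_matrix movies user_rating_matrix (calculate_movie_rating_matrix movies user_rating_matrix)

-- ===== LEMMAS AND PROOFS =====

-- the users who rated movie m, in user order
def pvUsersFor (urm : List (String × List (String × Int))) (m : String) : List String :=
  (urm.filter (fun p => (p.2.map Prod.fst).contains m)).map Prod.fst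

-- A's inner loop over users only ever rewrites the entry at `mv`
lemma pvA_inner (c : String → Bool) (mv : String) :
    ∀ (us : List String) (d : PySem.Dict String (List String)) (v : List String),
      List.foldl (fun mrm u => if c u then mrm.modify mv [] (fun l => l ++ [u]) else mrm)
        (d.insert mv v) us = d.insert mv (v ++ us.filter c) := by
  intro us
  induction us with
  | nil => intro d v; simp
  | cons u us ih =>
    intro d v
    rw [List.foldl_cons]
    by_cases h : c u
    · rw [if_pos h]
      have hm : (d.insert mv v).modify mv [] (fun l => l ++ [u]) = d.insert mv (v ++ [u]) := by
        rw [PySem.Dict.modify, PySem.Dict.getD_insert_self, PySem.Dict.insert_insert_self]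
      rw [hm, ih]
      simp [h]
    · rw [if_neg h, ih]
      simp [h]


-- first-match lookup in a duplicate-free association list returns the pair's own value
lemma pvLookup_self :
    ∀ (urm : List (String × List (String × Int))), (urm.map Prod.fst).Nodup →
      ∀ p ∈ urm, (PySem.Dict.mk urm).get? p.1 = some p.2 := by
  intro urm
  induction urm with
  | nil => simp
  | cons q rest ih =>
    obtain ⟨qk, qv⟩ := q
    intro h p hp
    simp only [List.map_cons, List.nodup_cons] at h
    rcases List.mem_cons.mp hp with h1 | h1
    · subst h1; simp [PySem.Dict.get?_mk_cons]
    · have hne : qk ≠ p.1 := fun e => h.1 (e ▸ List.mem_map_of_mem h1)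
      rw [PySem.Dict.get?_mk_cons]
      simp [hne, ih h.2 p h1]


-- A's per-movie user filter equals pvUsersFor under duplicate-free user keys
lemma pvA_cond (urm : List (String × List (String × Int))) (h : (urm.map Prod.fst).Nodup)
    (mv : String) :
    (urm.map Prod.fst).filter
        (fun u => ((((PySem.Dict.mk urm).get? u).getD []).map Prod.fst).contains mv)
      = pvUsersFor urm mv := by
  rw [List.filter_map, pvUsersFor]
  congr 1
  apply List.filter_congr
  intro p hp
  simp [Function.comp, pvLookup_self urm h p hp]


-- B's inner loop preserves the key list
lemma pvB_inner_keys (u : String) :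
    ∀ (qs : List (String × Int)) (d : PySem.Dict String (List String)),
      (List.foldl (fun d (q : String × Int) =>
          if d.contains q.1 then d.modify q.1 [] (fun l => l ++ [u]) else d) d qs).keys
        = d.keys := by
  intro qs
  induction qs with
  | nil => intro d; rfl
  | cons q qs ih =>
    intro d
    rw [List.foldl_cons]
    by_cases h : d.contains q.1
    · rw [if_pos h, ih, PySem.Dict.keys_modify, PySem.Dict.keys_insert_of_contains _ _ h]
    · rw [if_neg h, ih]


-- B's inner loop, pointwise: appends u at k exactly when k is a present key rated by the user
lemma pvB_inner (u : String) :
    ∀ (qs : List (String × Int)), (qs.map Prod.fst).Nodup →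
      ∀ (d : PySem.Dict String (List String)) (k : String),
      (List.foldl (fun d (q : String × Int) =>
          if d.contains q.1 then d.modify q.1 [] (fun l => l ++ [u]) else d) d qs).getD k []
        = d.getD k [] ++
            (if d.contains k = true ∧ k ∈ qs.map Prod.fst then [u] else []) := by
  intro qs
  induction qs with
  | nil => intro _ d k; simp
  | cons q qs ih =>
    intro hnd d k
    simp only [List.map_cons, List.nodup_cons] at hnd
    rw [List.foldl_cons]
    by_cases h : d.contains q.1
    · rw [if_pos h, ih hnd.2]
      have hck : (d.modify q.1 [] (fun l => l ++ [u])).contains k = d.contains k := by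
        rw [PySem.Dict.contains_modify]
        by_cases e : k = q.1
        · subst e; simp [h]
        · simp [e]
      rw [hck, PySem.Dict.getD_modify]
      by_cases e : k = q.1
      · subst e
        simp [h, hnd.1]
      · simp only [if_neg e]
        by_cases hm : k ∈ qs.map Prod.fst <;> simp [e, hm]
    · rw [if_neg h, ih hnd.2]
      by_cases e : k = q.1
      · subst e
        simp [h]
      · have : (k ∈ q.1 :: List.map Prod.fst qs) = (k ∈ List.map Prod.fst qs) := by
          simp [List.mem_cons, e]
        simp only [List.map_cons, this]


-- B's outer loop preserves the key list
lemma pvB_outer_keys :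
    ∀ (urm : List (String × List (String × Int))) (d : PySem.Dict String (List String)),
      (List.foldl (fun d (p : String × List (String × Int)) =>
          p.2.foldl (fun d (q : String × Int) =>
            if d.contains q.1 then d.modify q.1 [] (fun l => l ++ [p.1]) else d) d) d urm).keys
        = d.keys := by
  intro urm
  induction urm with
  | nil => intro d; rfl
  | cons p ps ih =>
    intro d
    rw [List.foldl_cons, ih, pvB_inner_keys]


-- B's outer loop, pointwise
lemma pvB_outer :
    ∀ (urm : List (String × List (String × Int))),
      (∀ p ∈ urm, (p.2.map Prod.fst).Nodup) →
      ∀ (d : PySem.Dict String (List String)) (k : String),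
      (List.foldl (fun d (p : String × List (String × Int)) =>
          p.2.foldl (fun d (q : String × Int) =>
            if d.contains q.1 then d.modify q.1 [] (fun l => l ++ [p.1]) else d) d) d urm).getD k []
        = d.getD k [] ++ (if d.contains k = true then pvUsersFor urm k else []) := by
  intro urm
  induction urm with
  | nil => intro _ d k; simp [pvUsersFor]
  | cons p ps ih =>
    intro hnd d k
    rw [List.foldl_cons]
    set d' := p.2.foldl (fun d (q : String × Int) =>
      if d.contains q.1 then d.modify q.1 [] (fun l => l ++ [p.1]) else d) d with hd'
    have hk : d'.contains k = d.contains k := by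
      rw [PySem.Dict.contains_eq_decide_mem_keys, PySem.Dict.contains_eq_decide_mem_keys,
        hd', pvB_inner_keys]
    have hg : d'.getD k [] = d.getD k [] ++ (if d.contains k = true ∧ k ∈ p.2.map Prod.fst then [p.1] else []) :=
      pvB_inner p.1 p.2 (hnd p (List.mem_cons_self)) d k
    rw [ih (fun q hq => hnd q (List.mem_cons_of_mem p hq)) d' k, hk, hg]
    have hu : pvUsersFor (p :: ps) k
        = (if k ∈ p.2.map Prod.fst then [p.1] else []) ++ pvUsersFor ps k := by
      by_cases hm : k ∈ p.2.map Prod.fst <;>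
        simp [pvUsersFor, hm]
    rw [hu]
    by_cases hc : d.contains k = true
    · by_cases hm : k ∈ p.2.map Prod.fst <;> simp [hc, hm]
    · simp [hc]


-- a left fold of inserts with key-determined values, pointwise
lemma pv_foldl_insert_getD (f : String → List String) :
    ∀ (ms : List String) (d : PySem.Dict String (List String)) (k : String),
      (ms.foldl (fun d m => d.insert m (f m)) d).getD k []
        = if k ∈ ms then f k else d.getD k [] := by
  intro ms
  induction ms with
  | nil => intro d k; simp
  | cons m ms ih =>
    intro d k
    rw [List.foldl_cons, ih]
    by_cases hm : k ∈ ms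
    · simp [hm]
    · by_cases e : k = m
      · subst e; simp [hm, PySem.Dict.getD_insert_self]
      · simp [hm, e, PySem.Dict.getD_insert]


-- ===== VERDICT (by name: the statement is the Claim_ definition above) =====
theorem calculate_movie_rating_matrix_spec : Claim_equal_calculate_movie_rating_matrix := by
  intro movies urm _hdom hpre
  obtain ⟨h1, h2⟩ := hpre
  unfold Spec_calculate_movie_rating_matrix
  unfold calculate_movie_rating_matrix calculate_movie_rating_matrix_alt
  have hA : (fun (mrm : PySem.Dict String (List String)) movie =>
      (PySem.Dict.mk urm).keys.foldl
        (fun mrm user =>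
          if ((((PySem.Dict.mk urm).get? user).getD []).map Prod.fst).contains movie
          then mrm.modify movie [] (fun l => l ++ [user]) else mrm)
        (mrm.insert movie []))
      = fun d mv => d.insert mv (pvUsersFor urm mv) := by
    funext d mv
    rw [pvA_inner, List.nil_append, PySem.Dict.keys_mk, pvA_cond urm h1 mv]
  rw [hA]
  simp only []
  set d0 : PySem.Dict String (List String) :=
    movies.foldl (fun d m => d.insert m []) PySem.Dict.empty with hd0
  set AD : PySem.Dict String (List String) :=
    movies.foldl (fun d mv => d.insert mv (pvUsersFor urm mv)) PySem.Dict.empty with hAD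
  set BD : PySem.Dict String (List String) :=
    urm.foldl (fun d (p : String × List (String × Int)) =>
      p.2.foldl (fun d (q : String × Int) =>
        if d.contains q.1 then d.modify q.1 [] (fun l => l ++ [p.1]) else d) d) d0 with hBD
  have hkA : AD.keys = PySem.Set.ofList movies := by
    rw [hAD, PySem.Dict.keys_foldl_insert movies (fun _ mv => pvUsersFor urm mv),
      PySem.Dict.keys_empty, PySem.Set.ofList_eq_foldl]; rfl
  have hk0 : d0.keys = PySem.Set.ofList movies := by
    rw [hd0, PySem.Dict.keys_foldl_insert movies (fun _ _ => []),
      PySem.Dict.keys_empty, PySem.Set.ofList_eq_foldl]; rfl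
  have hkB : BD.keys = PySem.Set.ofList movies := by rw [hBD, pvB_outer_keys, hk0]
  have hnA : AD.keys.Nodup := by
    rw [hAD]
    exact PySem.Dict.nodup_keys_foldl_insert movies _ _ PySem.Dict.nodup_keys_empty
  have hnB : BD.keys.Nodup := by
    rw [hkB, ← hkA]; exact hnA
  rw [PySem.Dict.items_eq_map_keys AD hnA [], PySem.Dict.items_eq_map_keys BD hnB [],
    hkA, hkB]
  apply List.map_congr_left
  intro k hk
  have hkm : k ∈ movies := (PySem.Set.mem_ofList movies k).mp hk
  have hgA : AD.getD k [] = pvUsersFor urm k := by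
    rw [hAD, pv_foldl_insert_getD (fun mv => pvUsersFor urm mv), if_pos hkm]
  have hg0 : d0.getD k [] = [] := by
    rw [hd0, pv_foldl_insert_getD (fun _ => [])]
    split <;> simp
  have hc0 : d0.contains k = true := by
    rw [PySem.Dict.contains_eq_decide_mem_keys, hk0]
    simp [PySem.Set.mem_ofList, hkm]
  have hgB : BD.getD k [] = pvUsersFor urm k := by
    rw [hBD, pvB_outer urm h2 d0 k, hg0, hc0]
    simp
  rw [hgA, hgB]
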